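-- pv_equiv track=rewrite | github.com/jamiebrine/bw-paidStatements | script.py | splitBySaleType
-- ===== SOURCE A (Python) =====
-- def splitBySaleType(rows):
--     """
--     Creates a dictionary of sale types and their new entries
--
--     Args:
--         rows (list of list): List of each new entry
--
--     Returns:
--         dict: Created dictionary
--     """
--     dict = {
--     }
--
--     for row in rows:
--
--         # Gets first 2 letters of sale number to determine type
--         saleType = row[0][:2]
--
--         # If a sale of this type is already in the dictionary, add to its list
--         if saleType in dict:
--             dict[saleType].append(row)
--         # Else, create a new entry in the dictionary
--         else:
--             dict[saleType] = [row]
--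
--     return dict
-- ===== SOURCE B (Python) =====
-- def splitBySaleType(rows):
--     """
--     Creates a dictionary of sale types and their new entries.
--
--     Two-pass regrouping: first collect the distinct sale-type prefixes in
--     order of first appearance, then build each group's list with a
--     filtering comprehension over rows.
--     """
--     order = []
--     for row in rows:
--         k = row[0][:2]
--         if k not in order:
--             order.append(k)
--     return {k: [row for row in rows if row[0][:2] == k] for k in order}
-- ===== Notes on version B (the rewrite author's own statement) =====
-- stated objective: alternative
-- what changed: Replaces the single-pass dict-building loop (append-or-create per row) with a two-pass scheme: a first scan collecting the distinct key prefixes in first-appearance order, then one filtering pass per key building each group's list.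
import Mathlib
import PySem

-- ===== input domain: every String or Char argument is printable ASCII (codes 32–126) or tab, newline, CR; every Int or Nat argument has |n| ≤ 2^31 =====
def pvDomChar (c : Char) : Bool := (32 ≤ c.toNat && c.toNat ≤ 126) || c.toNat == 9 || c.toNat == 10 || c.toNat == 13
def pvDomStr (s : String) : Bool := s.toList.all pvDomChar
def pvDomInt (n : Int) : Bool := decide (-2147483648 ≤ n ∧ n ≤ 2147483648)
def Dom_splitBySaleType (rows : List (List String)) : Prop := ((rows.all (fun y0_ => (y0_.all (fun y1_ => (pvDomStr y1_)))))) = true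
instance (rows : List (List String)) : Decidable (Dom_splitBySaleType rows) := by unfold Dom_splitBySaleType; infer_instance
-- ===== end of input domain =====

-- B replaces A's single-pass dict-building loop by a two-pass scheme (distinct keys first, then one filter per key); same value, objective: alternative.

-- ===== PORT A =====
def splitBySaleType (rows : List (List String)) : List (String × List (List String)) :=
  let d : PySem.Dict String (List (List String)) :=
    rows.foldl (fun d row =>
      -- saleType = row[0][:2]
      let saleType := PySem.Str.slice (PySem.List.pyGetD row 0 "") none (some 2)
      if d.contains saleType then
        d.modify saleType [] (fun l => l ++ [row])   -- dict[saleType].append(row)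
      else
        d.insert saleType [row]) PySem.Dict.empty
  d.items

-- ===== PORT B =====
def splitBySaleType_alt (rows : List (List String)) : List (String × List (List String)) :=
  -- first pass: distinct key prefixes in first-appearance order
  let order : PySem.Set String :=
    rows.foldl (fun s row =>
      PySem.Set.add s (PySem.Str.slice (PySem.List.pyGetD row 0 "") none (some 2)))
      PySem.Set.empty
  -- second pass: one filtering comprehension per key
  order.map (fun k =>
    (k, rows.filter (fun row =>
          PySem.Str.slice (PySem.List.pyGetD row 0 "") none (some 2) == k)))

-- ===== PRECONDITION & SPEC =====
-- Pre_ excludes exactly the inputs containing an empty row, on which A's row[0] raises IndexError (B raises there too).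
def Pre_splitBySaleType (rows : List (List String)) : Prop := ∀ row ∈ rows, row ≠ []
instance (rows : List (List String)) : Decidable (Pre_splitBySaleType rows) := by
  unfold Pre_splitBySaleType; infer_instance

def pvWitness_splitBySaleType : List (List String) :=
  [["AB123", "x"], ["CD4"], ["AB99", "y"], ["A"]]

def Spec_splitBySaleType (rows : List (List String)) (out : List (String × List (List String))) : Prop := out = splitBySaleType_alt rows
instance (rows : List (List String)) (out : List (String × List (List String))) : Decidable (Spec_splitBySaleType rows out) := by unfold Spec_splitBySaleType; infer_instance

-- ===== CLAIM (what is proved, stated in full; the proofs are below) =====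
def Claim_equal_splitBySaleType : Prop := ∀ (rows : List (List String)), Dom_splitBySaleType rows → Pre_splitBySaleType rows → Spec_splitBySaleType rows (splitBySaleType rows)

-- ===== LEMMAS AND PROOFS =====

-- the key both ports compute for a row: row[0][:2]
def pvKey (row : List String) : String :=
  PySem.Str.slice (PySem.List.pyGetD row 0 "") none (some 2)

-- A's loop body equals a 'modify' in both branches
lemma pvStep_eq_modify (d : PySem.Dict String (List (List String))) (row : List String) :
    (if d.contains (pvKey row) then d.modify (pvKey row) [] (fun l => l ++ [row])
     else d.insert (pvKey row) [row])
      = d.modify (pvKey row) [] (fun l => l ++ [row]) := by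
  by_cases h : d.contains (pvKey row) = true
  · simp [h]
  · have h' : d.contains (pvKey row) = false := by simpa using h
    rw [if_neg h]
    unfold PySem.Dict.modify
    rw [PySem.Dict.getD_of_not_contains d [] h']
    rfl

-- A's dict as a single modify-fold
lemma pvDictA_eq (rows : List (List String)) :
    rows.foldl (fun d row =>
      let saleType := PySem.Str.slice (PySem.List.pyGetD row 0 "") none (some 2)
      if d.contains saleType then d.modify saleType [] (fun l => l ++ [row])
      else d.insert saleType [row]) PySem.Dict.empty
    = rows.foldl (fun d row => d.modify (pvKey row) [] (fun l => l ++ [row]))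
        PySem.Dict.empty := by
  refine PySem.List.foldl_congr_mem _ _ _ _ ?_
  intro acc row _
  simpa [pvKey] using pvStep_eq_modify acc row

theorem splitBySaleType_equal (rows : List (List String)) :
    splitBySaleType rows = splitBySaleType_alt rows := by
  unfold splitBySaleType splitBySaleType_alt
  rw [pvDictA_eq]
  have hmod :
      rows.foldl (fun d row => d.modify (pvKey row) [] (fun l => l ++ [row]))
        PySem.Dict.empty
      = (rows.map (fun r => (pvKey r, r))).foldl
          (fun d p => d.modify p.1 [] (fun l => l ++ [p.2])) PySem.Dict.empty := by
    rw [List.foldl_map]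
  have hnd :
      (rows.foldl (fun d row => d.modify (pvKey row) [] (fun l => l ++ [row]))
        PySem.Dict.empty).keys.Nodup :=
    PySem.Dict.nodup_keys_foldl_modify_key rows pvKey [] (fun _ row l => l ++ [row]) _
      (by simp [PySem.Dict.keys_empty])
  rw [PySem.Dict.items_eq_map_keys _ hnd []]
  have hkeys :
      (rows.foldl (fun d row => d.modify (pvKey row) [] (fun l => l ++ [row]))
        PySem.Dict.empty).keys
      = rows.foldl (fun s row => PySem.Set.add s (pvKey row)) PySem.Set.empty := by
    rw [PySem.Dict.keys_foldl_modify_key rows pvKey [] (fun _ row l => l ++ [row])]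
    simp [PySem.Set.update, PySem.Set.empty, PySem.Dict.keys_empty, List.foldl_map]
  rw [hkeys]
  have horder :
      (rows.foldl (fun s row =>
        PySem.Set.add s (PySem.Str.slice (PySem.List.pyGetD row 0 "") none (some 2)))
        PySem.Set.empty)
      = rows.foldl (fun s row => PySem.Set.add s (pvKey row)) PySem.Set.empty := rfl
  rw [horder]
  refine List.map_congr_left ?_
  intro k _
  refine Prod.ext rfl ?_
  show (rows.foldl (fun d row => d.modify (pvKey row) [] (fun l => l ++ [row]))
        PySem.Dict.empty).getD k []
      = rows.filter (fun row =>
          PySem.Str.slice (PySem.List.pyGetD row 0 "") none (some 2) == k)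
  rw [hmod, PySem.Dict.getD_foldl_modify_append]
  simp [List.filter_map, Function.comp_def, pvKey]

-- ===== VERDICT (by name: the statement is the Claim_ definition above) =====
theorem splitBySaleType_spec : Claim_equal_splitBySaleType := by
  intro rows _ _
  unfold Spec_splitBySaleType
  exact splitBySaleType_equal rows
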